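-- pv_equiv track=rewrite | github.com/NahidaNahida/HOSS | WeightedAdder/adder_specification.py | program_specification_value
-- ===== SOURCE A (Python) =====
-- def program_specification_value(n, num_qubits, number, weight):
--     '''
--         return theta for Ry gate
--     '''
--     # initial state = [1, 0] means (01)b = 1
--     s = num_qubits - n
--     strNumber = bin(number)[2:]
--     strNumber = strNumber.zfill(n)
--     initial_state = [int(bit) for bit in strNumber]
--     revInitialState = initial_state[::-1]
--     expRes = 0
--     for i in range(n):
--         expRes += revInitialState[i] * weight[i]
--     strExpRes = bin(int(expRes))[2:]
--     strExpRes = strExpRes.zfill(s)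
--     strExpRes = strExpRes[::-1]
--     value = number
--     for ind, bit in enumerate(strExpRes):
--         value += int(bit) * (2 ** (n + ind))
--     return value
-- ===== SOURCE B (Python) =====
-- def program_specification_value(n, num_qubits, number, weight):
--     # closed form: the encoded value is number + 2**n * (weighted sum of number's low n bits)
--     exp_res = 0
--     for i in range(n):
--         exp_res += ((number // 2 ** i) % 2) * weight[i]
--     return number + 2 ** n * exp_res
-- ===== Notes on version B (the rewrite author's own statement) =====
-- stated objective: simpler
-- what changed: B drops A's bin()/zfill string pipeline entirely: it extracts the low n bits of number arithmetically and returns number + 2**n * weighted_sum as a closed form, instead of re-encoding the sum into a reversed zero-filled binary string and reconstructing the value bit by bit in a second loop.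
-- outside the precondition, e.g. on program_specification_value(-1, 2, 3, [1, 2]): A returns 3.0, B returns 3.0
import Mathlib
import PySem

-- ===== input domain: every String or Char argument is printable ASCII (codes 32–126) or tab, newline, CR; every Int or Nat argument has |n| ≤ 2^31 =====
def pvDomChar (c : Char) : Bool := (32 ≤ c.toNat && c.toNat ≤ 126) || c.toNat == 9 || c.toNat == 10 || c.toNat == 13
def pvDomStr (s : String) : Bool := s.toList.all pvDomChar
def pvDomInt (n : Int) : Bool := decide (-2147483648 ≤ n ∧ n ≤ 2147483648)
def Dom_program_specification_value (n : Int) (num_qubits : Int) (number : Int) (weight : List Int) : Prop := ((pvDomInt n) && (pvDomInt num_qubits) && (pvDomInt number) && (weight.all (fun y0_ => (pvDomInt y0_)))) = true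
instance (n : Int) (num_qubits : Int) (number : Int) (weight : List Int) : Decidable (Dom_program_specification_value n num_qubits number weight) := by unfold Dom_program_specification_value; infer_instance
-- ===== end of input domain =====

-- B replaces A's bin()/zfill string pipeline with an arithmetic bit extraction and the
-- closed form number + 2**n * weighted_sum (objective: simpler).

-- ===== PORT A =====

-- int(bit) for a binary-digit character; exact on '0'/'1' (any other character raises
-- ValueError in Python — those inputs are excluded by Pre_).
def pvBitInt (c : Char) : Int := if c = '1' then 1 else 0

def program_specification_value (n : Int) (num_qubits : Int) (number : Int) (weight : List Int) : Int :=
  let s : Int := num_qubits - n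
  -- bin(number)[2:] ; exact where Python does not raise later (Pre_ forces 0 ≤ number)
  let strNumber := PySem.List.slice (PySem.Int.toBinChars0b number) (some 2) none
  let strNumber := PySem.Chars.zfill strNumber n
  let initial_state := strNumber.map pvBitInt
  -- initial_state[::-1] is reverse (PySem.List.slice?_none_none_neg_one)
  let revInitialState := initial_state.reverse
  let expRes := (PySem.List.pyRange 0 n 1).foldl
    (fun acc i => acc + PySem.List.pyGetD revInitialState i 0 * PySem.List.pyGetD weight i 0) 0
  -- bin(int(expRes))[2:].zfill(s)[::-1] ; int() of an int is the identity
  let strExpRes := (PySem.Chars.zfill (PySem.List.slice (PySem.Int.toBinChars0b expRes) (some 2) none) s).reverse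
  -- 2 ** (n + ind): exact for n + ind ≥ 0 (for n < 0 Python yields a float; Pre_ forces 0 ≤ n)
  (PySem.List.enumerate strExpRes 0).foldl
    (fun value p => value + pvBitInt p.2 * (2 : Int) ^ (n + p.1).toNat) number

-- ===== PORT B =====

def program_specification_value_alt (n : Int) (num_qubits : Int) (number : Int) (weight : List Int) : Int :=
  -- (number // 2**i) % 2: exact (floor division, divisor positive);
  -- 2**i / 2**n exponents are nonnegative for i ∈ range(n) and 0 ≤ n (Pre_; for n < 0 Python yields a float)
  let expRes := (PySem.List.pyRange 0 n 1).foldl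
    (fun acc i => acc + PySem.Int.mod (PySem.Int.floordiv number ((2 : Int) ^ i.toNat)) 2 * PySem.List.pyGetD weight i 0) 0
  number + (2 : Int) ^ n.toNat * expRes

-- ===== PRECONDITION & SPEC =====

-- Pre_ excludes exactly the inputs where A raises (number < 0 or a negative weighted bit-sum make
-- int() hit the 'b' of a negative bin() string → ValueError; n > len(weight) → IndexError) or where
-- A returns a float instead of an int (n < 0 makes 2**(n+ind) a float).
def Pre_program_specification_value (n : Int) (num_qubits : Int) (number : Int) (weight : List Int) : Prop :=
  0 ≤ n ∧ 0 ≤ number ∧ n ≤ (weight.length : Int) ∧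
  0 ≤ ((List.range n.toNat).map (fun i => (number / 2 ^ i % 2) * weight.getD i 0)).sum
instance (n : Int) (num_qubits : Int) (number : Int) (weight : List Int) : Decidable (Pre_program_specification_value n num_qubits number weight) := by unfold Pre_program_specification_value; infer_instance

def pvWitness_program_specification_value : Int × Int × Int × List Int := (2, 4, 3, [1, 2])

def Spec_program_specification_value (n : Int) (num_qubits : Int) (number : Int) (weight : List Int) (out : Int) : Prop := out = program_specification_value_alt n num_qubits number weight
instance (n : Int) (num_qubits : Int) (number : Int) (weight : List Int) (out : Int) : Decidable (Spec_program_specification_value n num_qubits number weight out) := by unfold Spec_program_specification_value; infer_instance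

-- ===== CLAIM (what is proved, stated in full; the proofs are below) =====
def Claim_equal_program_specification_value : Prop := ∀ (n : Int) (num_qubits : Int) (number : Int) (weight : List Int), Dom_program_specification_value n num_qubits number weight → Pre_program_specification_value n num_qubits number weight → Spec_program_specification_value n num_qubits number weight (program_specification_value n num_qubits number weight)

-- ===== LEMMAS AND PROOFS =====

-- binary digits of m, least significant first ([] for 0)
def pvLsbF (m : Nat) : List Nat :=
  if _h : m = 0 then [] else m % 2 :: pvLsbF (m / 2)
decreasing_by exact Nat.div_lt_self (Nat.pos_of_ne_zero _h) (by omega)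

lemma pvToDigitsCore_eq (f : Nat) : ∀ (m : Nat) (ds : List Char), 0 < m → m < 2 ^ f →
    Nat.toDigitsCore 2 f m ds = ((pvLsbF m).map Nat.digitChar).reverse ++ ds := by
  induction f with
  | zero => intro m ds h1 h2; simp at h2; omega
  | succ f ih =>
    intro m ds h1 h2
    rw [Nat.toDigitsCore]
    by_cases h0 : m / 2 = 0
    · have hm1 : m = 1 := by omega
      subst hm1
      simp [pvLsbF]
    · simp only [h0, if_false]
      rw [ih (m / 2) _ (by omega) (by
        rw [pow_succ] at h2
        exact Nat.div_lt_of_lt_mul (by omega))]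
      conv_rhs => rw [pvLsbF, dif_neg (by omega)]
      simp

lemma pvToDigits_two_eq (m : Nat) :
    Nat.toDigits 2 m = if m = 0 then ['0'] else ((pvLsbF m).map Nat.digitChar).reverse := by
  by_cases h : m = 0
  · subst h; rfl
  · rw [if_neg h]
    show Nat.toDigitsCore 2 (m + 1) m [] = _
    rw [pvToDigitsCore_eq (m + 1) m [] (by omega)
      (lt_of_lt_of_le Nat.lt_two_pow_self (Nat.pow_le_pow_right (by omega) (by omega)))]
    simp

-- every digit of pvLsbF is 0 or 1
lemma pvLsbF_lt_two (m : Nat) : ∀ d ∈ pvLsbF m, d < 2 := by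
  fun_induction pvLsbF with
  | case1 => simp
  | case2 m h ih =>
    intro d hd
    rcases List.mem_cons.mp hd with h' | h'
    · omega
    · exact ih d h'

lemma pvToDigits_mem (m : Nat) : ∀ c ∈ Nat.toDigits 2 m, c = '0' ∨ c = '1' := by
  rw [pvToDigits_two_eq]
  split
  · simp
  · intro c hc
    simp only [List.mem_reverse, List.mem_map] at hc
    obtain ⟨d, hd, rfl⟩ := hc
    have := pvLsbF_lt_two m d hd
    interval_cases d
    · left; rfl
    · right; rfl

-- zfill on a pure binary-digit string is a left pad with '0'
lemma pvZfill_eq (cs : List Char) (w : Int) (h : ∀ c ∈ cs, c = '0' ∨ c = '1') :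
    PySem.Chars.zfill cs w = List.replicate (w.toNat - cs.length) '0' ++ cs := by
  rw [PySem.Chars.zfill.eq_def]
  split
  · rename_i hw
    have h0 : w.toNat - cs.length = 0 := by omega
    rw [h0]
    simp
  · rename_i hw
    cases cs with
    | nil => simp
    | cons c rest =>
      have hc := h c (by simp)
      simp only []
      rw [if_neg (by rcases hc with h' | h' <;> subst h' <;> simp)]

-- value of a list of bits, least significant first
def pvValI : List Int → Int
  | [] => 0
  | b :: t => b + 2 * pvValI t

lemma pvValI_lsb (m : Nat) : pvValI ((pvLsbF m).map (fun d => pvBitInt (Nat.digitChar d))) = (m : Int) := by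
  fun_induction pvLsbF with
  | case1 => simp [pvValI]
  | case2 m h ih =>
    simp only [List.map_cons, pvValI, ih]
    have h2 : m % 2 = 0 ∨ m % 2 = 1 := by omega
    rcases h2 with h2 | h2 <;> rw [h2] <;> simp [Nat.digitChar, pvBitInt] <;> omega

lemma pvGetD_lsb (m : Nat) : ∀ (i : Nat),
    ((pvLsbF m).map (fun d => pvBitInt (Nat.digitChar d))).getD i 0 = ((m / 2 ^ i % 2 : Nat) : Int) := by
  fun_induction pvLsbF with
  | case1 => intro i; simp
  | case2 m h ih =>
    intro i
    cases i with
    | zero =>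
      simp only [List.map_cons, List.getD_cons_zero, pow_zero, Nat.div_one]
      have h2 : m % 2 = 0 ∨ m % 2 = 1 := by omega
      rcases h2 with h2 | h2 <;> rw [h2] <;> simp [Nat.digitChar, pvBitInt]
    | succ i =>
      simp only [List.map_cons, List.getD_cons_succ, ih i]
      rw [Nat.div_div_eq_div_mul, ← pow_succ']

-- binary string of m, reversed and read as bits
lemma pvBin_rev_getD (m : Nat) (i : Nat) :
    (((Nat.toDigits 2 m).map pvBitInt).reverse).getD i 0 = ((m / 2 ^ i % 2 : Nat) : Int) := by
  rw [pvToDigits_two_eq]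
  by_cases h : m = 0
  · subst h
    cases i <;> simp [pvBitInt]
  · rw [if_neg h, List.map_reverse, List.reverse_reverse, List.map_map]
    exact pvGetD_lsb m i

lemma pvBin_rev_val (m : Nat) :
    pvValI (((Nat.toDigits 2 m).map pvBitInt).reverse) = (m : Int) := by
  rw [pvToDigits_two_eq]
  by_cases h : m = 0
  · subst h; simp [pvValI, pvBitInt]
  · rw [if_neg h, List.map_reverse, List.reverse_reverse, List.map_map]
    exact pvValI_lsb m

lemma pvGetD_append_replicate (xs : List Int) (j i : Nat) :
    (xs ++ List.replicate j (0 : Int)).getD i 0 = xs.getD i 0 := by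
  simp only [List.getD_eq_getElem?_getD, List.getElem?_append, List.getElem?_replicate]
  split
  · rfl
  · rename_i hi
    rw [List.getElem?_eq_none (by omega)]
    split <;> simp

lemma pvValI_append_replicate (xs : List Int) (j : Nat) :
    pvValI (xs ++ List.replicate j (0 : Int)) = pvValI xs := by
  induction xs with
  | nil =>
    simp only [List.nil_append]
    induction j with
    | zero => rfl
    | succ j ih => simpa [List.replicate_succ, pvValI] using ih
  | cons b t ih => simp [pvValI, ih]

-- the reversed zero-filled binary string of m, read as bits
lemma pvPadded_map (m : Nat) (w : Int) :
    ((PySem.Chars.zfill (Nat.toDigits 2 m) w).map pvBitInt).reverse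
      = ((Nat.toDigits 2 m).map pvBitInt).reverse
        ++ List.replicate (w.toNat - (Nat.toDigits 2 m).length) (0 : Int) := by
  rw [pvZfill_eq _ _ (pvToDigits_mem m)]
  simp [pvBitInt]

lemma pvRev_getD (m : Nat) (w : Int) (i : Nat) :
    (((PySem.Chars.zfill (Nat.toDigits 2 m) w).map pvBitInt).reverse).getD i 0
      = ((m / 2 ^ i % 2 : Nat) : Int) := by
  rw [pvPadded_map, pvGetD_append_replicate, pvBin_rev_getD]

lemma pvRev_val (m : Nat) (w : Int) :
    pvValI (((PySem.Chars.zfill (Nat.toDigits 2 m) w).map pvBitInt).reverse) = (m : Int) := by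
  rw [pvPadded_map, pvValI_append_replicate, pvBin_rev_val]

-- the second loop of A is a positional evaluation
lemma pvFoldEnum (nN : Nat) : ∀ (cs : List Char) (k : Nat) (acc : Int),
    (PySem.List.enumerate cs (k : Int)).foldl
        (fun value p => value + pvBitInt p.2 * (2 : Int) ^ ((nN : Int) + p.1).toNat) acc
      = acc + (2 : Int) ^ (nN + k) * pvValI (cs.map pvBitInt) := by
  intro cs
  induction cs with
  | nil => intro k acc; simp [PySem.List.enumerate, pvValI]
  | cons c t ih =>
    intro k acc
    rw [PySem.List.enumerate_cons]
    simp only [List.foldl_cons]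
    have hcast : ((k : Int) + 1) = ((k + 1 : Nat) : Int) := by push_cast; ring
    rw [hcast, ih (k + 1)]
    have hexp : (((nN : Int)) + (k : Int)).toNat = nN + k := by omega
    simp only [hexp, List.map_cons, pvValI]
    rw [pow_add, pow_add, pow_succ]
    ring

-- scalar bridge: A's bit (from the reversed padded string) = B's arithmetic bit
lemma pvBit_eq (number : Int) (hnum : 0 ≤ number) (k : Nat) :
    ((number.toNat / 2 ^ k % 2 : Nat) : Int)
      = PySem.Int.mod (PySem.Int.floordiv number ((2 : Int) ^ k)) 2 := by
  have h2 : ((2 : Int) ^ k) = ((2 ^ k : Nat) : Int) := by push_cast; ring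
  rw [← Int.toNat_of_nonneg hnum, h2, PySem.Int.floordiv_natCast]
  have h3 : (2 : Int) = ((2 : Nat) : Int) := rfl
  rw [h3, PySem.Int.mod_natCast]
  simp

-- both first loops compute the same weighted bit-sum, in Pre_'s closed form
lemma pvSum_eq (n number : Int) (weight : List Int) (hnum : 0 ≤ number) :
    ((List.range n.toNat).map (fun i => (number / 2 ^ i % 2) * weight.getD i 0)).sum
      = ((List.range n.toNat).map
          (fun k => ((number.toNat / 2 ^ k % 2 : Nat) : Int) * weight.getD k 0)).sum := by
  apply congrArg
  apply List.map_congr_left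
  intro k _
  congr 1
  rw [← Int.toNat_of_nonneg hnum]
  push_cast [Int.natCast_div]
  rfl

-- fold-with-start-index form of pvFoldEnum, with the Int exponent base of port A
lemma pvFoldEnum0 (n : Int) (hn : 0 ≤ n) (cs : List Char) (acc : Int) :
    (PySem.List.enumerate cs 0).foldl
        (fun value p => value + pvBitInt p.2 * (2 : Int) ^ (n + p.1).toNat) acc
      = acc + (2 : Int) ^ n.toNat * pvValI (cs.map pvBitInt) := by
  have h := pvFoldEnum n.toNat cs 0 acc
  simpa only [Int.toNat_of_nonneg hn, Nat.cast_zero, add_zero] using h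

-- ===== VERDICT (by name: the statement is the Claim_ definition above) =====
theorem program_specification_value_spec : Claim_equal_program_specification_value := by
  intro n num_qubits number weight _ hpre
  obtain ⟨hn, hnum, hlen, hsum⟩ := hpre
  unfold Spec_program_specification_value
  simp only [program_specification_value, program_specification_value_alt]
  -- bin(number)[2:] for 0 ≤ number
  have hbinN : PySem.List.slice (PySem.Int.toBinChars0b number) (some 2) none
      = Nat.toDigits 2 number.toNat := by
    rw [PySem.Int.toBinChars0b, if_neg (by omega),
      show ((2 : Int)) = ((2 : Nat) : Int) from rfl, PySem.List.slice_from_natCast]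
    rfl
  rw [hbinN]
  -- the two first loops agree pointwise
  set rev := (List.map pvBitInt (PySem.Chars.zfill (Nat.toDigits 2 number.toNat) n)).reverse
    with hrev
  have hbody : ∀ (acc i : Int), i ∈ PySem.List.pyRange 0 n 1 →
      acc + PySem.List.pyGetD rev i 0 * PySem.List.pyGetD weight i 0
        = acc + PySem.Int.mod (PySem.Int.floordiv number ((2 : Int) ^ i.toNat)) 2
            * PySem.List.pyGetD weight i 0 := by
    intro acc i hi
    rw [PySem.List.mem_pyRange_one] at hi
    rw [show i = ((i.toNat : Nat) : Int) by omega]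
    simp only [Int.toNat_natCast, PySem.List.pyGetD_natCast]
    rw [hrev, pvRev_getD, pvBit_eq number hnum i.toNat]
  rw [PySem.List.foldl_congr_mem _ _ _ _ hbody]
  -- both first loops equal the closed-form weighted bit-sum
  have hfold : (PySem.List.pyRange 0 n 1).foldl
      (fun acc i => acc + PySem.Int.mod (PySem.Int.floordiv number ((2 : Int) ^ i.toNat)) 2
        * PySem.List.pyGetD weight i 0) 0
      = ((List.range n.toNat).map
          (fun k => ((number.toNat / 2 ^ k % 2 : Nat) : Int) * weight.getD k 0)).sum := by
    rw [PySem.List.foldl_add, PySem.List.pyRange_one, List.map_map]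
    simp only [zero_add, Int.sub_zero]
    apply congrArg
    apply List.map_congr_left
    intro k _
    simp only [Function.comp_apply, Int.toNat_natCast, PySem.List.pyGetD_natCast]
    rw [← pvBit_eq number hnum k]
  rw [hfold]
  set S : Int := ((List.range n.toNat).map
    (fun k => ((number.toNat / 2 ^ k % 2 : Nat) : Int) * weight.getD k 0)).sum with hS
  have hSnn : 0 ≤ S := by
    rw [hS, ← pvSum_eq n number weight hnum]
    exact hsum
  -- bin(int(expRes))[2:] for 0 ≤ expRes
  have hbinS : PySem.List.slice (PySem.Int.toBinChars0b S) (some 2) none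
      = Nat.toDigits 2 S.toNat := by
    rw [PySem.Int.toBinChars0b, if_neg (by omega),
      show ((2 : Int)) = ((2 : Nat) : Int) from rfl, PySem.List.slice_from_natCast]
    rfl
  rw [hbinS]
  -- the second loop is a positional evaluation: number + 2^n * S
  rw [pvFoldEnum0 n hn, List.map_reverse, pvRev_val, Int.toNat_of_nonneg hSnn]
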